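-- pv_equiv track=rewrite | github.com/stepkurniawan/JumpStartGit | py Exercise/solution.py | reconstruct_structure
-- ===== SOURCE A (Python) =====
-- def reconstruct_structure(text, separator, num_columns):
--     '''Returns a reconstructed data structure with num_columns number of columns'''
--
--     structured = ''
--     for i, element in enumerate(text.split(separator)):
--         if (i + 1) % 4:
--             structured += element + separator
--         else:
--             structured += element + '\n'
--
--     return structured
-- ===== SOURCE B (Python) =====
-- def reconstruct_structure(text, separator, num_columns):
--     '''Returns a reconstructed data structure with num_columns number of columns'''
--     parts = text.split(separator)
--     chunks = [parts[i:i + 4] for i in range(0, len(parts), 4)]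
--     return ''.join(separator.join(c) + ('\n' if len(c) == 4 else separator)
--                    for c in chunks)
-- ===== Notes on version B (the rewrite author's own statement) =====
-- stated objective: alternative
-- what changed: Replaces the per-element enumerate loop with a running index-mod-4 test by partitioning the split parts into chunks of 4 and concatenating separator.join(chunk) plus a per-chunk terminator ('\n' for full chunks, the separator otherwise).
import Mathlib
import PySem

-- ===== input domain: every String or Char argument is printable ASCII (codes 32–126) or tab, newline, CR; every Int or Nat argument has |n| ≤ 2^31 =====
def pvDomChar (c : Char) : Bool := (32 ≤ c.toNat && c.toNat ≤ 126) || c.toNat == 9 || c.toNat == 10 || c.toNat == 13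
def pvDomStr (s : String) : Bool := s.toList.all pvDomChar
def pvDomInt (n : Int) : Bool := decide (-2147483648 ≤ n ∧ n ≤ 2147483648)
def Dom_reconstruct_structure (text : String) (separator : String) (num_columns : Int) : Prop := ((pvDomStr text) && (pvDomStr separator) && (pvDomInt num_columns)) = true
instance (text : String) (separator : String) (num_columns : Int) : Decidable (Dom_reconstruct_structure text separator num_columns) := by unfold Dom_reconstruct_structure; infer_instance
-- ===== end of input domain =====

-- B restates A's per-element loop (running index mod 4) as chunks-of-4 with a joined chunk
-- plus a per-chunk terminator; same cost, different decomposition (objective: alternative).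

-- ===== PORT A =====
-- A: fold over the split parts carrying (index, accumulated string); each element gets the
-- separator appended, except every 4th element (index+1 divisible by 4) which gets '\n'.
def reconstruct_structure (text : String) (separator : String) (num_columns : Int) : String :=
  match PySem.Str.split? text separator with
  | none => ""   -- separator = "": Python raises ValueError here; excluded by Pre_
  | some parts =>
    (parts.foldl
      (fun (st : Nat × String) element =>
        if (st.1 + 1) % 4 ≠ 0 then (st.1 + 1, st.2 ++ element ++ separator)
        else (st.1 + 1, st.2 ++ element ++ "\n"))
      (0, "")).2

-- ===== PORT B =====
-- B-side helper: consecutive chunks of 4 (= [parts[i:i+4] for i in range(0, len(parts), 4)])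
def pvChunks4 : List String → List (List String)
  | [] => []
  | a :: rest => (a :: rest.take 3) :: pvChunks4 (rest.drop 3)
termination_by l => l.length
decreasing_by simp

def reconstruct_structure_alt (text : String) (separator : String) (num_columns : Int) : String :=
  match PySem.Str.split? text separator with
  | none => ""   -- separator = "": Python raises ValueError here; excluded by Pre_
  | some parts =>
    String.join ((pvChunks4 parts).map (fun c =>
      PySem.Str.join separator c ++ (if c.length == 4 then "\n" else separator)))

-- ===== PRECONDITION & SPEC =====
-- Pre_ excludes only separator = "", on which Python's str.split raises ValueError (both A and B).
def Pre_reconstruct_structure (text : String) (separator : String) (num_columns : Int) : Prop :=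
  separator ≠ ""
instance (text : String) (separator : String) (num_columns : Int) : Decidable (Pre_reconstruct_structure text separator num_columns) := by unfold Pre_reconstruct_structure; infer_instance

def pvWitness_reconstruct_structure : String × String × Int := ("a,b,c,d,e", ",", 3)

def Spec_reconstruct_structure (text : String) (separator : String) (num_columns : Int) (out : String) : Prop := out = reconstruct_structure_alt text separator num_columns
instance (text : String) (separator : String) (num_columns : Int) (out : String) : Decidable (Spec_reconstruct_structure text separator num_columns out) := by unfold Spec_reconstruct_structure; infer_instance

-- ===== CLAIM (what is proved, stated in full; the proofs are below) =====
def Claim_equal_reconstruct_structure : Prop := ∀ (text : String) (separator : String) (num_columns : Int), Dom_reconstruct_structure text separator num_columns → Pre_reconstruct_structure text separator num_columns → Spec_reconstruct_structure text separator num_columns (reconstruct_structure text separator num_columns)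

-- ===== LEMMAS AND PROOFS =====

theorem pv_join_pull (l : List String) : ∀ (s : String),
    List.foldl (fun r x => r ++ x) s l = s ++ List.foldl (fun r x => r ++ x) "" l := by
  induction l with
  | nil => intro s; simp [List.foldl]
  | cons x xs ih =>
    intro s
    simp only [List.foldl]
    rw [ih (s ++ x), ih ("" ++ x)]
    simp [String.append_assoc]

theorem pv_join_cons (x : String) (l : List String) :
    String.join (x :: l) = x ++ String.join l := by
  simp only [String.join, List.foldl]
  rw [pv_join_pull l ("" ++ x)]
  simp

-- The loop invariant: starting A's fold at any index i ≡ 0 (mod 4) with accumulator acc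
-- yields acc followed by B's chunked rendering of the remaining parts.
theorem pv_key (separator : String) (parts : List String) : ∀ (i : Nat) (acc : String),
    i % 4 = 0 →
    (parts.foldl
      (fun (st : Nat × String) element =>
        if (st.1 + 1) % 4 ≠ 0 then (st.1 + 1, st.2 ++ element ++ separator)
        else (st.1 + 1, st.2 ++ element ++ "\n"))
      (i, acc)).2
    = acc ++ String.join ((pvChunks4 parts).map (fun c =>
        PySem.Str.join separator c ++ (if c.length == 4 then "\n" else separator))) := by
  induction parts using pvChunks4.induct with
  | case1 => intro i acc h; simp [pvChunks4, String.join]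
  | case2 a rest ih =>
    intro i acc h
    match rest with
    | [] =>
      have h1 : (i + 1) % 4 ≠ 0 := by omega
      simp [pvChunks4, List.foldl, h1, String.join, PySem.Str.join,
            PySem.Chars.join_singleton, String.append_assoc]
    | [b] =>
      have h1 : (i + 1) % 4 ≠ 0 := by omega
      have h2 : (i + 1 + 1) % 4 ≠ 0 := by omega
      simp [pvChunks4, List.foldl, h1, h2, String.join, PySem.Str.join,
            PySem.Chars.join_cons_cons, PySem.Chars.join_singleton, String.append_assoc]
    | [b, c] =>
      have h1 : (i + 1) % 4 ≠ 0 := by omega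
      have h2 : (i + 1 + 1) % 4 ≠ 0 := by omega
      have h3 : (i + 1 + 1 + 1) % 4 ≠ 0 := by omega
      simp [pvChunks4, List.foldl, h1, h2, h3, String.join, PySem.Str.join,
            PySem.Chars.join_cons_cons, PySem.Chars.join_singleton, String.append_assoc]
    | b :: c :: d :: rest' =>
      have h1 : (i + 1) % 4 ≠ 0 := by omega
      have h2 : (i + 1 + 1) % 4 ≠ 0 := by omega
      have h3 : (i + 1 + 1 + 1) % 4 ≠ 0 := by omega
      have h4 : ¬ (i + 1 + 1 + 1 + 1) % 4 ≠ 0 := by omega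
      have hrec := ih (i + 1 + 1 + 1 + 1)
        (acc ++ a ++ separator ++ b ++ separator ++ c ++ separator ++ d ++ "\n") (by omega)
      simp only [List.drop_succ_cons, List.drop_zero] at hrec
      simp only [List.foldl, h1, h2, h3, h4, if_neg, not_false_iff, ite_not] at hrec ⊢
      rw [hrec]
      simp [pvChunks4, pv_join_cons, PySem.Str.join,
            PySem.Chars.join_cons_cons, PySem.Chars.join_singleton, String.append_assoc]

-- ===== VERDICT (by name: the statement is the Claim_ definition above) =====
theorem reconstruct_structure_spec : Claim_equal_reconstruct_structure := by
  intro text separator num_columns _ _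
  unfold Spec_reconstruct_structure reconstruct_structure reconstruct_structure_alt
  cases h : PySem.Str.split? text separator with
  | none => rfl
  | some parts => simpa using pv_key separator parts 0 "" (by omega)
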